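-- pv_equiv track=rewrite | github.com/BarnabyShearer/aoc | aoc20201204a.py | aoc
-- ===== SOURCE A (Python) =====
-- def aoc(data):
--     total = 0
--     for passport in data.split("\n\n"):
--         passport = " " + passport.replace("\n", " ")
--         ok = True
--         for key in ["byr", "iyr", "eyr", "hgt", "hcl", "ecl", "pid"]:
--             if f" {key}:" not in passport:
--                 ok = False
--         if ok:
--             total += 1
--     return total
-- ===== SOURCE B (Python) =====
-- REQUIRED = ("byr", "iyr", "eyr", "hgt", "hcl", "ecl", "pid")
--
--
-- def _keys(block):
--     return [tok.split(":", 1)[0]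
--             for tok in block.replace("\n", " ").split(" ")
--             if ":" in tok]
--
--
-- def _valid(block):
--     keys = _keys(block)
--     return all(k in keys for k in REQUIRED)
--
--
-- def aoc(data):
--     return sum(1 for block in data.split("\n\n") if _valid(block))
-- ===== Notes on version B (the rewrite author's own statement) =====
-- stated objective: simpler
-- what changed: B builds, once per passport block, the list of field keys (the part before the first ':' of each space-separated token that contains ':') and checks the seven required keys by membership in that index, then counts valid blocks with sum/countP, instead of A's seven independent substring scans over a space-prefixed copy of each block with a mutable ok flag.
import Mathlib
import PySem

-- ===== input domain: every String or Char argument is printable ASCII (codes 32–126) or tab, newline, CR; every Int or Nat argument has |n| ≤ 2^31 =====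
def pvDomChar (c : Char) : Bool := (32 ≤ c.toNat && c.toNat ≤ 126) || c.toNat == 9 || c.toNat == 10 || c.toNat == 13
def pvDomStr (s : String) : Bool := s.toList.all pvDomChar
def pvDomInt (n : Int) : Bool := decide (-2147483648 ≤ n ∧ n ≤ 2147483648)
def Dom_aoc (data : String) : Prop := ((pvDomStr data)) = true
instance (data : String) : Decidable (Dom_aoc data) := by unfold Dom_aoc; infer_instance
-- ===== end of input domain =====

-- B builds an index of each passport's field keys once and tests the seven required keys by
-- membership, counting valid blocks, instead of A's seven substring scans (objective: simpler).

-- ===== PORT A =====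
def pvKeysA : List (List Char) :=
  [['b','y','r'], ['i','y','r'], ['e','y','r'], ['h','g','t'],
   ['h','c','l'], ['e','c','l'], ['p','i','d']]

def aoc (data : String) : Int :=
  (PySem.Chars.splitOn data.toList ['\n', '\n']).foldl (fun total passport =>
    -- passport = " " + passport.replace("\n", " ")
    let p := ' ' :: PySem.Chars.replace passport ['\n'] [' ']
    -- for key in [...]: if f" {key}:" not in passport: ok = False
    let ok := pvKeysA.foldl (fun ok key =>
      if !(PySem.Chars.isIn (' ' :: (key ++ [':'])) p) then false else ok) true
    if ok then total + 1 else total) 0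

-- ===== PORT B =====
def pvRequired : List (List Char) :=
  [['b','y','r'], ['i','y','r'], ['e','y','r'], ['h','g','t'],
   ['h','c','l'], ['e','c','l'], ['p','i','d']]

-- _keys: [tok.split(":", 1)[0] for tok in block.replace("\n", " ").split(" ") if ":" in tok]
-- tok.split(":", 1)[0] is the part of tok before its first ':' → List.takeWhile (· != ':')
def pvKeysOf (block : List Char) : List (List Char) :=
  (PySem.Chars.splitOn (PySem.Chars.replace block ['\n'] [' ']) [' ']).filterMap
    (fun tok => if PySem.Chars.isIn [':'] tok then some (tok.takeWhile (· != ':')) else none)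

-- _valid: all(k in keys for k in REQUIRED)
def pvValid (block : List Char) : Bool :=
  pvRequired.all (fun k => (pvKeysOf block).contains k)

-- sum(1 for block in data.split("\n\n") if _valid(block)) → countP
def aoc_alt (data : String) : Int :=
  ((PySem.Chars.splitOn data.toList ['\n', '\n']).countP pvValid : Int)

-- ===== PRECONDITION & SPEC =====
def Spec_aoc (data : String) (out : Int) : Prop := out = aoc_alt data
instance (data : String) (out : Int) : Decidable (Spec_aoc data out) := by unfold Spec_aoc; infer_instance

-- ===== CLAIM (what is proved, stated in full; the proofs are below) =====
def Claim_equal_aoc : Prop := ∀ (data : String), Dom_aoc data → Spec_aoc data (aoc data)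

-- ===== LEMMAS AND PROOFS =====

-- Reference form of Python's single-space split, s.split(" ")
def pvSpl : List Char → List (List Char)
  | [] => [[]]
  | c :: cs => if c = ' ' then [] :: pvSpl cs else (pvSpl cs).modifyHead (c :: ·)

theorem pvSpl_ne_nil (cs : List Char) : pvSpl cs ≠ [] := by
  cases cs with
  | nil => simp [pvSpl]
  | cons c cs =>
    simp only [pvSpl]
    split
    · simp
    · cases h : pvSpl cs with
      | nil => exact absurd h (pvSpl_ne_nil cs)
      | cons a t => simp [List.modifyHead]

theorem pv_go (fuel : Nat) : ∀ (l cur : List Char) (acc : List (List Char)), l.length < fuel →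
    PySem.Chars.splitOn.go [' '] fuel l cur acc
      = acc.reverse ++ (pvSpl l).modifyHead (cur.reverse ++ ·) := by
  induction fuel with
  | zero => intro l cur acc h; omega
  | succ f ih =>
    intro l cur acc h
    cases l with
    | nil => simp [PySem.Chars.splitOn.go, pvSpl]
    | cons c rest =>
      by_cases hc : c = ' '
      · subst hc
        rw [PySem.Chars.splitOn.go]
        rw [if_pos (by simp [List.isPrefixOf])]
        rw [ih _ _ _ (by simpa using Nat.lt_of_succ_lt_succ h)]
        simp only [pvSpl, List.reverse_cons, List.append_assoc,
          List.singleton_append, List.reverse_nil, List.nil_append]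
        cases hsp : pvSpl rest with
        | nil => exact absurd hsp (pvSpl_ne_nil rest)
        | cons a t => simp [hsp]
      · rw [PySem.Chars.splitOn.go]
        rw [if_neg (by simp [List.isPrefixOf, Ne.symm hc])]
        rw [ih _ _ _ (by simpa using Nat.lt_of_succ_lt_succ h)]
        simp only [pvSpl, if_neg hc]
        cases hsp : pvSpl rest with
        | nil => exact absurd hsp (pvSpl_ne_nil rest)
        | cons a t => simp [List.modifyHead]

theorem pv_splitOn_space (cs : List Char) :
    PySem.Chars.splitOn cs [' '] = pvSpl cs := by
  rw [PySem.Chars.splitOn, pv_go _ _ _ _ (by omega)]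
  cases h : pvSpl cs with
  | nil => exact absurd h (pvSpl_ne_nil cs)
  | cons a t => simp [List.modifyHead]

-- A space-free w occurs right after a space in " " ++ cs iff some token of cs.split(" ") starts with w
theorem pv_main (cs : List Char) : ∀ (w : List Char), ' ' ∉ w →
    ((w <+: cs ↔ w <+: (pvSpl cs).headI) ∧
     ((' ' :: w) <:+: cs ↔ ∃ t ∈ (pvSpl cs).tail, w <+: t)) := by
  induction cs with
  | nil =>
    intro w hw
    constructor
    · simp [pvSpl]
    · simp [pvSpl]
  | cons c cs ih =>
    intro w hw
    by_cases hc : c = ' '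
    · subst hc
      have h1 : w <+: (' ' :: cs) ↔ w = [] := by
        constructor
        · intro h
          cases w with
          | nil => rfl
          | cons a w' =>
            obtain ⟨r, hr⟩ := h
            simp at hr
            exact absurd (hr.1 ▸ rfl : a = ' ') (fun he => hw (he ▸ List.mem_cons_self))
        · rintro rfl; exact List.nil_prefix
      constructor
      · simp only [pvSpl, List.headI]
        rw [h1]
        simp
      · rw [List.infix_cons_iff]
        simp only [pvSpl, List.tail]
        have hsp := pvSpl_ne_nil cs
        rw [List.cons_prefix_cons]
        constructor
        · rintro (⟨-, hp⟩ | hi)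
          · rcases h' : pvSpl cs with _ | ⟨a, t⟩
            · exact absurd h' hsp
            · exact ⟨a, by simp, ((ih w hw).1.mp hp).trans (by simp [h', List.headI])⟩
          · obtain ⟨t, ht, hp⟩ := (ih w hw).2.mp hi
            rcases h' : pvSpl cs with _ | ⟨a, ts⟩
            · exact absurd h' hsp
            · exact ⟨t, by simp [h'] at ht ⊢; right; exact ht, hp⟩
        · rintro ⟨t, ht, hp⟩
          rcases h' : pvSpl cs with _ | ⟨a, ts⟩
          · exact absurd h' hsp
          · rw [h'] at ht
            rcases List.mem_cons.mp ht with rfl | ht'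
            · exact Or.inl ⟨rfl, (ih w hw).1.mpr (by simpa [h', List.headI] using hp)⟩
            · exact Or.inr ((ih w hw).2.mpr ⟨t, by simpa [h'] using ht', hp⟩)
    · constructor
      · simp only [pvSpl, if_neg hc]
        rcases h' : pvSpl cs with _ | ⟨a, ts⟩
        · exact absurd h' (pvSpl_ne_nil cs)
        · simp only [List.modifyHead, List.headI]
          cases w with
          | nil => simp
          | cons b w' =>
            rw [List.cons_prefix_cons, List.cons_prefix_cons]
            have := (ih w' (fun h => hw (List.mem_cons_of_mem _ h))).1
            rw [h', List.headI] at this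
            exact and_congr_right (fun _ => this)
      · rw [List.infix_cons_iff]
        have hpre : ¬ ((' ' :: w) <+: (c :: cs)) := by
          rw [List.cons_prefix_cons]
          rintro ⟨h, -⟩
          exact hc h.symm
        simp only [pvSpl, if_neg hc]
        rcases h' : pvSpl cs with _ | ⟨a, ts⟩
        · exact absurd h' (pvSpl_ne_nil cs)
        · simp only [List.modifyHead, List.tail, hpre, false_or]
          have := (ih w hw).2
          rw [h', List.tail] at this
          exact this

theorem pv_infix_iff_token (w cs : List Char) (hw : ' ' ∉ w) :
    (' ' :: w) <:+: (' ' :: cs) ↔ ∃ t ∈ pvSpl cs, w <+: t := by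
  rw [List.infix_cons_iff, List.cons_prefix_cons]
  have h := pv_main cs w hw
  rcases h' : pvSpl cs with _ | ⟨a, ts⟩
  · exact absurd h' (pvSpl_ne_nil cs)
  · rw [h', List.headI, List.tail] at h
    simp only [h.1, h.2, List.mem_cons, true_and]
    constructor
    · rintro (hp | ⟨t, ht, hp⟩)
      · exact ⟨a, Or.inl rfl, hp⟩
      · exact ⟨t, Or.inr ht, hp⟩
    · rintro ⟨t, (rfl | ht), hp⟩
      · exact Or.inl hp
      · exact Or.inr ⟨t, ht, hp⟩

-- A token yields key k iff it starts with k ++ ":"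
theorem pv_token (k t : List Char) (hk : ':' ∉ k) :
    (PySem.Chars.isIn [':'] t = true ∧ t.takeWhile (· != ':') = k) ↔ (k ++ [':']) <+: t := by
  rw [PySem.Chars.isIn_iff_infix]
  constructor
  · rintro ⟨hmem, htake⟩
    have hsplit := List.takeWhile_append_dropWhile (p := (· != ':')) (l := t)
    cases hd : t.dropWhile (· != ':') with
    | nil =>
      rw [hd, List.append_nil, htake] at hsplit
      obtain ⟨s, u, hsu⟩ := hmem
      have : ':' ∈ t := by rw [← hsu]; simp
      rw [← hsplit] at this
      exact absurd this hk
    | cons d r =>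
      have hne : t.dropWhile (· != ':') ≠ [] := by rw [hd]; simp
      have h0 := List.head_dropWhile_not (p := (· != ':')) (l := t) hne
      have hd' : d = ':' := by
        have hh : (t.dropWhile (· != ':')).head hne = d := by simp [hd]
        rw [hh] at h0; simpa using h0
      refine ⟨r, ?_⟩
      rw [← hsplit, htake, hd, hd']
      simp
  · rintro ⟨r, hr⟩
    subst hr
    constructor
    · exact ⟨k, r, by simp⟩
    · rw [List.append_assoc, List.singleton_append,
        List.takeWhile_append_of_pos (by
          intro a ha
          simp only [bne_iff_ne, ne_eq]
          exact fun h => hk (by rw [← h]; exact ha))]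
      simp

-- k is in B's key index iff some token yields it
theorem pv_mem_keys (block k : List Char) :
    k ∈ pvKeysOf block ↔
      ∃ t ∈ PySem.Chars.splitOn (PySem.Chars.replace block ['\n'] [' ']) [' '],
        PySem.Chars.isIn [':'] t = true ∧ t.takeWhile (· != ':') = k := by
  unfold pvKeysOf
  rw [List.mem_filterMap]
  refine exists_congr fun t => and_congr_right fun _ => ?_
  by_cases h : PySem.Chars.isIn [':'] t = true
  · simp [h]
  · simp [h]

-- A's short-circuit ok-fold is List.all
theorem pv_ok_fold (cond : List Char → Bool) (ks : List (List Char)) : ∀ (b : Bool),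
    ks.foldl (fun ok key => if !(cond key) then false else ok) b = (b && ks.all cond) := by
  induction ks with
  | nil => intro b; simp
  | cons k ks ih =>
    intro b
    simp only [List.foldl_cons, List.all_cons, ih]
    cases h : cond k <;> cases b <;> simp_all

-- the per-passport equivalence
theorem pv_block (passport : List Char) :
    (pvKeysA.foldl (fun ok key =>
        if !(PySem.Chars.isIn (' ' :: (key ++ [':']))
              (' ' :: PySem.Chars.replace passport ['\n'] [' '])) then false else ok) true)
    = pvValid passport := by
  rw [pv_ok_fold, Bool.true_and]
  unfold pvValid
  have hreq : pvRequired = pvKeysA := by decide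
  rw [hreq]
  rw [Bool.eq_iff_iff, List.all_eq_true, List.all_eq_true]
  have hkey : ∀ k ∈ pvKeysA, ' ' ∉ k ∧ ':' ∉ k := by decide
  refine forall₂_congr (fun k hkmem => ?_)
  obtain ⟨hsp, hcol⟩ := hkey k hkmem
  have hw : ' ' ∉ (k ++ [':']) := by
    intro h
    rcases List.mem_append.mp h with h | h
    · exact hsp h
    · simp at h
  rw [PySem.Chars.isIn_iff_infix, List.contains_iff_mem,
    pv_infix_iff_token (k ++ [':']) _ hw, pv_mem_keys, pv_splitOn_space]
  exact exists_congr fun t => and_congr_right fun _ => (pv_token k t hcol).symm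

-- A's counting fold is countP
theorem pv_count (f : List Char → Bool) (l : List (List Char)) : ∀ (n : Int),
    l.foldl (fun total p => if f p then total + 1 else total) n = n + (l.countP f : Int) := by
  induction l with
  | nil => intro n; simp
  | cons p l ih =>
    intro n
    simp only [List.foldl_cons, List.countP_cons]
    by_cases h : f p = true
    · rw [if_pos h, ih, h]; simp only [if_true]; push_cast; omega
    · rw [if_neg h, ih]; simp [h]

-- ===== VERDICT (by name: the statement is the Claim_ definition above) =====
theorem aoc_spec : Claim_equal_aoc := by
  intro data _
  unfold Spec_aoc aoc aoc_alt
  have : ∀ (total : Int) (passport : List Char),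
      (let p := ' ' :: PySem.Chars.replace passport ['\n'] [' ']
       let ok := pvKeysA.foldl (fun ok key =>
         if !(PySem.Chars.isIn (' ' :: (key ++ [':'])) p) then false else ok) true
       if ok then total + 1 else total)
      = (if pvValid passport then total + 1 else total) := by
    intro total passport
    simp only [pv_block]
  rw [funext fun total => funext fun passport => this total passport, pv_count]
  simp
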